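-- pv_equiv track=rewrite | github.com/thomascassidyzm/ssi-dashboard-v7 | vfs/courses/ita_for_eng_30seeds/generate_baskets_batch1_complete.py | extract_d_phrases
-- ===== SOURCE A (Python) =====
-- def extract_d_phrases(e_phrases, operative_lego_target):
--     """Extract 2-5 word windows from e-phrases that contain the operative LEGO"""
--     d_phrases = {"2": [], "3": [], "4": [], "5": []}
--
--     for ep_target, ep_known in e_phrases:
--         # Clean punctuation
--         target_clean = ep_target.replace('.', '').replace('?', '').replace('!', '').replace(',', '')
--         known_clean = ep_known.replace('.', '').replace('?', '').replace('!', '').replace(',', '')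
--
--         target_words = target_clean.split()
--         known_words = known_clean.split()
--
--         # Try windows of size 2-5
--         for window_size in [2, 3, 4, 5]:
--             if len(d_phrases[str(window_size)]) >= 2:
--                 continue
--
--             for i in range(len(target_words) - window_size + 1):
--                 window_target = ' '.join(target_words[i:i+window_size])
--                 window_known = ' '.join(known_words[i:i+window_size])
--
--                 # Check if operative LEGO is in this window
--                 if operative_lego_target.lower() in window_target.lower():
--                     phrase = [window_target, window_known]
--                     if phrase not in d_phrases[str(window_size)]:
--                         d_phrases[str(window_size)].append(phrase)
--                         if len(d_phrases[str(window_size)]) >= 2: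
--                             break
--
--     return d_phrases
-- ===== SOURCE B (Python) =====
-- def extract_d_phrases(e_phrases, operative_lego_target):
--     """Extract 2-5 word windows from e-phrases that contain the operative LEGO"""
--     lego = operative_lego_target.lower()
--     # Phase 1: one pass over the phrases generating every matching candidate window,
--     # in the original (phrase, size, start-index) order.
--     candidates = []
--     for ep_target, ep_known in e_phrases:
--         tw = ep_target.replace('.', '').replace('?', '').replace('!', '').replace(',', '').split()
--         kw = ep_known.replace('.', '').replace('?', '').replace('!', '').replace(',', '').split()
--         for size in (2, 3, 4, 5):
--             for i in range(len(tw) - size + 1):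
--                 wt = ' '.join(tw[i:i + size])
--                 if lego in wt.lower():
--                     candidates.append((size, wt, ' '.join(kw[i:i + size])))
--     # Phase 2: one pass over the candidate stream, capping each bucket at 2 distinct pairs.
--     d_phrases = {"2": [], "3": [], "4": [], "5": []}
--     for size, wt, wk in candidates:
--         bucket = d_phrases[str(size)]
--         if len(bucket) < 2 and [wt, wk] not in bucket:
--             bucket.append([wt, wk])
--     return d_phrases
-- ===== Notes on version B (the rewrite author's own statement) =====
-- stated objective: alternative
-- what changed: A interleaves window generation with bucket-filling (per-phrase continue/break state on the shared dict); B splits the work into two passes: first generate the flat stream of matching candidate windows in the original order, then one scan over that stream fills the capped (2 per size, deduped) buckets with a uniform step and no break/continue logic.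
import Mathlib
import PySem

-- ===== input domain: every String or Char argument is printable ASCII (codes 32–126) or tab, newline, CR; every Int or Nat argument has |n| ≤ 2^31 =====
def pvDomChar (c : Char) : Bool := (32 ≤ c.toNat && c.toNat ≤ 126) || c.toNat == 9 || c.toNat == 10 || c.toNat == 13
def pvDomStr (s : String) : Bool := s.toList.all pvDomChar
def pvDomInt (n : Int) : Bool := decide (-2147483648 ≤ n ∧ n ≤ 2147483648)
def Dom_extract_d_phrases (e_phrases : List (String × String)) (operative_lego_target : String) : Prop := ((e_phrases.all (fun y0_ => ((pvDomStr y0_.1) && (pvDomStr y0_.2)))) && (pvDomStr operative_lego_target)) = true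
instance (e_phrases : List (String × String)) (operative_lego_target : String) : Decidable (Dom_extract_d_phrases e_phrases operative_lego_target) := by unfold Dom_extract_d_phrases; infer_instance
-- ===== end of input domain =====

-- B restructures A's interleaved window search into two passes: generate the matching
-- candidate windows in A's iteration order, then fill the capped/deduped buckets in one
-- scan over that stream (objective: alternative decomposition; same asymptotic cost).

-- ===== PORT A =====
-- punctuation cleaning, identical in both Pythons (the four .replace calls; shared by both ports)
def pvClean (s : String) : String :=
  PySem.Str.replace (PySem.Str.replace (PySem.Str.replace (PySem.Str.replace s "." "") "?" "") "!" "") "," ""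

-- inner 'for i in range(...)' loop of A, with its break (returning the dict) transcribed
def pvInnerA (operative_lego_target : String) (target_words known_words : List String) (window_size : Int) :
    List Int → PySem.Dict String (List (List String)) → PySem.Dict String (List (List String))
  | [], d => d
  | i :: rest, d =>
    let window_target := PySem.Str.join " " (PySem.List.slice target_words (some i) (some (i + window_size)))
    let window_known := PySem.Str.join " " (PySem.List.slice known_words (some i) (some (i + window_size)))
    if PySem.Str.isIn (PySem.Str.lower operative_lego_target) (PySem.Str.lower window_target) then
      let phrase := [window_target, window_known]
      if phrase ∈ d.getD (PySem.Int.toStr window_size) [] then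
        pvInnerA operative_lego_target target_words known_words window_size rest d
      else
        let d' := d.modify (PySem.Int.toStr window_size) [] (· ++ [phrase])
        if 2 ≤ (d'.getD (PySem.Int.toStr window_size) []).length then d'
        else pvInnerA operative_lego_target target_words known_words window_size rest d'
    else pvInnerA operative_lego_target target_words known_words window_size rest d

def extract_d_phrases (e_phrases : List (String × String)) (operative_lego_target : String) : List (String × List (List String)) :=
  let d0 : PySem.Dict String (List (List String)) :=
    ((((PySem.Dict.empty).insert "2" []).insert "3" []).insert "4" []).insert "5" []
  (e_phrases.foldl (fun d ep =>
      let target_words := PySem.Str.split₀ (pvClean ep.1)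
      let known_words := PySem.Str.split₀ (pvClean ep.2)
      ([2, 3, 4, 5] : List Int).foldl (fun d window_size =>
        if 2 ≤ (d.getD (PySem.Int.toStr window_size) []).length then d
        else pvInnerA operative_lego_target target_words known_words window_size
               (PySem.List.pyRange 0 (PySem.List.len target_words - window_size + 1) 1) d) d)
    d0).items

-- ===== PORT B =====
-- phase 1 of B: the flat candidate stream (size, target window, known window)
def pvCandB (lego : String) (e_phrases : List (String × String)) : List (Int × String × String) :=
  e_phrases.flatMap (fun ep =>
    let tw := PySem.Str.split₀ (pvClean ep.1)
    let kw := PySem.Str.split₀ (pvClean ep.2)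
    ([2, 3, 4, 5] : List Int).flatMap (fun size =>
      (PySem.List.pyRange 0 (PySem.List.len tw - size + 1) 1).filterMap (fun i =>
        let wt := PySem.Str.join " " (PySem.List.slice tw (some i) (some (i + size)))
        if PySem.Str.isIn lego (PySem.Str.lower wt) then
          some (size, wt, PySem.Str.join " " (PySem.List.slice kw (some i) (some (i + size))))
        else none)))

-- phase 2 of B: one selection step per candidate
def pvStepB (d : PySem.Dict String (List (List String))) (c : Int × String × String) :
    PySem.Dict String (List (List String)) :=
  let bucket := d.getD (PySem.Int.toStr c.1) []
  if bucket.length < 2 ∧ [c.2.1, c.2.2] ∉ bucket then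
    d.modify (PySem.Int.toStr c.1) [] (· ++ [[c.2.1, c.2.2]])
  else d

def extract_d_phrases_alt (e_phrases : List (String × String)) (operative_lego_target : String) : List (String × List (List String)) :=
  let d0 : PySem.Dict String (List (List String)) :=
    ((((PySem.Dict.empty).insert "2" []).insert "3" []).insert "4" []).insert "5" []
  ((pvCandB (PySem.Str.lower operative_lego_target) e_phrases).foldl pvStepB d0).items

-- ===== PRECONDITION & SPEC =====
def Spec_extract_d_phrases (e_phrases : List (String × String)) (operative_lego_target : String) (out : List (String × List (List String))) : Prop := out = extract_d_phrases_alt e_phrases operative_lego_target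
instance (e_phrases : List (String × String)) (operative_lego_target : String) (out : List (String × List (List String))) : Decidable (Spec_extract_d_phrases e_phrases operative_lego_target out) := by unfold Spec_extract_d_phrases; infer_instance

-- ===== CLAIM (what is proved, stated in full; the proofs are below) =====
def Claim_equal_extract_d_phrases : Prop := ∀ (e_phrases : List (String × String)) (operative_lego_target : String), Dom_extract_d_phrases e_phrases operative_lego_target → Spec_extract_d_phrases e_phrases operative_lego_target (extract_d_phrases e_phrases operative_lego_target)

-- ===== LEMMAS AND PROOFS =====

theorem pv_foldl_flatMap {α β γ : Type} (l : List α) (g : α → List β) (f : γ → β → γ) (init : γ) :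
    (l.flatMap g).foldl f init = l.foldl (fun acc x => (g x).foldl f acc) init := by
  induction l generalizing init with
  | nil => rfl
  | cons x xs ih => simp [List.flatMap_cons, List.foldl_append, ih]

-- once a bucket is full, B's step ignores every further candidate of that size
theorem pv_step_full (ws : Int) (cs : List (Int × String × String))
    (d : PySem.Dict String (List (List String)))
    (hall : ∀ c ∈ cs, c.1 = ws) (hfull : 2 ≤ (d.getD (PySem.Int.toStr ws) []).length) :
    cs.foldl pvStepB d = d := by
  induction cs with
  | nil => rfl
  | cons c cs ih =>
    have hc : c.1 = ws := hall c (by simp)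
    have : pvStepB d c = d := by
      unfold pvStepB
      rw [hc]
      rw [if_neg (by rintro ⟨h1, -⟩; omega)]
    simp only [List.foldl_cons]
    rw [this]
    exact ih (fun c hc => hall c (by simp [hc]))

-- every candidate generated for window size ws carries ws as its first component
theorem pv_cand_fst (tws kws : List String) (lg : String) (ws : Int) (idxs : List Int) :
    ∀ c ∈ idxs.filterMap (fun i =>
        let wt := PySem.Str.join " " (PySem.List.slice tws (some i) (some (i + ws)))
        if PySem.Str.isIn lg (PySem.Str.lower wt) then
          some (ws, wt, PySem.Str.join " " (PySem.List.slice kws (some i) (some (i + ws))))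
        else none), c.1 = ws := by
  intro c hc
  simp only [List.mem_filterMap] at hc
  obtain ⟨i, -, hi⟩ := hc
  split at hi
  · cases hi; rfl
  · cases hi

-- A's inner loop, entered with a non-full bucket, equals B's fold over that size's candidates
theorem pv_inner_eq (lego : String) (tws kws : List String) (ws : Int) (idxs : List Int)
    (d : PySem.Dict String (List (List String)))
    (hlt : (d.getD (PySem.Int.toStr ws) []).length < 2) :
    pvInnerA lego tws kws ws idxs d =
      (idxs.filterMap (fun i =>
        let wt := PySem.Str.join " " (PySem.List.slice tws (some i) (some (i + ws)))
        if PySem.Str.isIn (PySem.Str.lower lego) (PySem.Str.lower wt) then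
          some (ws, wt, PySem.Str.join " " (PySem.List.slice kws (some i) (some (i + ws))))
        else none)).foldl pvStepB d := by
  induction idxs generalizing d with
  | nil => rfl
  | cons i rest ih =>
    simp only [pvInnerA, List.filterMap_cons]
    by_cases hin : PySem.Str.isIn (PySem.Str.lower lego)
        (PySem.Str.lower (PySem.Str.join " " (PySem.List.slice tws (some i) (some (i + ws))))) = true
    · simp only [hin, if_true, List.foldl_cons]
      by_cases hmem : [PySem.Str.join " " (PySem.List.slice tws (some i) (some (i + ws))),
          PySem.Str.join " " (PySem.List.slice kws (some i) (some (i + ws)))] ∈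
            d.getD (PySem.Int.toStr ws) []
      · rw [if_pos hmem]
        have hstep : pvStepB d (ws, PySem.Str.join " " (PySem.List.slice tws (some i) (some (i + ws))),
            PySem.Str.join " " (PySem.List.slice kws (some i) (some (i + ws)))) = d := by
          unfold pvStepB
          exact if_neg (by rintro ⟨-, h2⟩; exact h2 hmem)
        rw [hstep]
        exact ih d hlt
      · rw [if_neg hmem]
        have hstep : pvStepB d (ws, PySem.Str.join " " (PySem.List.slice tws (some i) (some (i + ws))),
            PySem.Str.join " " (PySem.List.slice kws (some i) (some (i + ws)))) =
            d.modify (PySem.Int.toStr ws) [] (· ++ [[PySem.Str.join " " (PySem.List.slice tws (some i) (some (i + ws))),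
              PySem.Str.join " " (PySem.List.slice kws (some i) (some (i + ws)))]]) := by
          unfold pvStepB
          exact if_pos ⟨hlt, hmem⟩
        rw [hstep]
        have hlen : ((d.modify (PySem.Int.toStr ws) [] (· ++ [[PySem.Str.join " " (PySem.List.slice tws (some i) (some (i + ws))),
            PySem.Str.join " " (PySem.List.slice kws (some i) (some (i + ws)))]])).getD (PySem.Int.toStr ws) []).length =
            (d.getD (PySem.Int.toStr ws) []).length + 1 := by
          rw [PySem.Dict.getD_modify_self]
          simp
        by_cases hful : 2 ≤ ((d.modify (PySem.Int.toStr ws) [] (· ++ [[PySem.Str.join " " (PySem.List.slice tws (some i) (some (i + ws))),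
            PySem.Str.join " " (PySem.List.slice kws (some i) (some (i + ws)))]])).getD (PySem.Int.toStr ws) []).length
        · rw [if_pos hful]
          exact (pv_step_full ws _ _ (pv_cand_fst tws kws (PySem.Str.lower lego) ws rest) hful).symm
        · rw [if_neg hful]
          exact ih _ (by omega)
    · simp only [hin, if_false, Bool.false_eq_true]
      exact ih d hlt

-- ===== VERDICT (by name: the statement is the Claim_ definition above) =====
theorem extract_d_phrases_spec : Claim_equal_extract_d_phrases := by
  intro e_phrases op _
  unfold Spec_extract_d_phrases extract_d_phrases extract_d_phrases_alt pvCandB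
  dsimp only
  rw [pv_foldl_flatMap]
  apply congrArg PySem.Dict.items
  apply PySem.List.foldl_congr_mem
  intro d ep _
  dsimp only
  rw [pv_foldl_flatMap]
  apply PySem.List.foldl_congr_mem
  intro d' ws _
  by_cases hful : 2 ≤ (d'.getD (PySem.Int.toStr ws) []).length
  · rw [if_pos hful]
    exact (pv_step_full ws _ _ (pv_cand_fst _ _ _ ws _) hful).symm
  · rw [if_neg hful]
    exact pv_inner_eq op _ _ ws _ d' (by omega)
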